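-- pv_equiv track=rewrite | github.com/maquinanerd/TheNerd-MN26 | test_3phase_pipeline.py | _has_cta
-- ===== SOURCE A (Python) =====
-- def _has_cta(html: str) -> bool:
--     lowered = html.lower()
--     cta_markers = [
--         "subscribe", "inscreva", "clique aqui", "click here",
--         "thank you for reading", "obrigado por ler", "sign up",
--         "stay tuned", "follow us",
--     ]
--     return any(m in lowered for m in cta_markers)
-- ===== SOURCE B (Python) =====
-- CTA_MARKERS = (
--     "subscribe", "inscreva", "clique aqui", "click here",
--     "thank you for reading", "obrigado por ler", "sign up",
--     "stay tuned", "follow us",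
-- )
--
-- def _has_cta(html: str) -> bool:
--     lowered = html.lower()
--     # single left-to-right pass: at each position, test whether some marker starts here
--     return any(
--         lowered.startswith(m, i)
--         for i in range(len(lowered) + 1)
--         for m in CTA_MARKERS
--     )
-- ===== Notes on version B (the rewrite author's own statement) =====
-- stated objective: alternative
-- what changed: Replaces the marker-outer loop of nine independent substring scans ('m in lowered' per marker) by a single position-outer left-to-right pass that tests at each position whether any marker starts there (startswith).
import Mathlib
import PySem

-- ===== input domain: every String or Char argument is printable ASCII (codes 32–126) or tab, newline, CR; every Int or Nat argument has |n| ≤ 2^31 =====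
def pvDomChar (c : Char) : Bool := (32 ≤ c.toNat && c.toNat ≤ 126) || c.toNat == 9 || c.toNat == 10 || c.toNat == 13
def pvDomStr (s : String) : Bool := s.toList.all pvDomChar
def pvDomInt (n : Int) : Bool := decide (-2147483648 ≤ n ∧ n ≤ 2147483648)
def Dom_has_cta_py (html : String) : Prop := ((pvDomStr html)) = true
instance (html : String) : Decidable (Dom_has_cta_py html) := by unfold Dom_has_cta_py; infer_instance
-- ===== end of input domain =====

-- B does one position-outer left-to-right pass testing markers by prefix at each position,
-- instead of A's nine independent whole-string substring scans (objective: alternative, same cost class).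

-- ===== PORT A =====
def ctaMarkersA : List String :=
  ["subscribe", "inscreva", "clique aqui", "click here",
   "thank you for reading", "obrigado por ler", "sign up",
   "stay tuned", "follow us"]

def has_cta_py (html : String) : Bool :=
  let lowered := PySem.Str.lower html
  ctaMarkersA.any (fun m => PySem.Str.isIn m lowered)

-- ===== PORT B =====
def ctaMarkersB : List String :=
  ["subscribe", "inscreva", "clique aqui", "click here",
   "thank you for reading", "obrigado por ler", "sign up",
   "stay tuned", "follow us"]

-- the loop 'for i in range(len(lowered)+1): if any(lowered.startswith(m, i) …)':
-- recursion over the suffixes of lowered; startswith(m, i) = m is a prefix of the suffix at i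
def ctaScan (ms : List (List Char)) : List Char → Bool
  | [] => ms.any (fun m => PySem.Chars.startswith [] m)
  | c :: rest => ms.any (fun m => PySem.Chars.startswith (c :: rest) m) || ctaScan ms rest

def has_cta_py_alt (html : String) : Bool :=
  let lowered := PySem.Str.lower html
  ctaScan (ctaMarkersB.map String.toList) lowered.toList

-- ===== PRECONDITION & SPEC =====
def Spec_has_cta_py (html : String) (out : Bool) : Prop := out = has_cta_py_alt html
instance (html : String) (out : Bool) : Decidable (Spec_has_cta_py html out) := by unfold Spec_has_cta_py; infer_instance

-- ===== CLAIM (what is proved, stated in full; the proofs are below) =====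
def Claim_equal_has_cta_py : Prop := ∀ (html : String), Dom_has_cta_py html → Spec_has_cta_py html (has_cta_py html)

-- ===== LEMMAS AND PROOFS =====
theorem ctaScan_iff (ms : List (List Char)) (l : List Char) :
    ctaScan ms l = true ↔ ∃ m ∈ ms, m <:+: l := by
  induction l with
  | nil =>
      simp [ctaScan, List.any_eq_true, PySem.Chars.startswith_iff]
  | cons c rest ih =>
      simp only [ctaScan, Bool.or_eq_true, List.any_eq_true,
        PySem.Chars.startswith_iff, ih, List.infix_cons_iff]
      constructor
      · rintro (⟨m, hm, h⟩ | ⟨m, hm, h⟩)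
        · exact ⟨m, hm, Or.inl h⟩
        · exact ⟨m, hm, Or.inr h⟩
      · rintro ⟨m, hm, h | h⟩
        · exact Or.inl ⟨m, hm, h⟩
        · exact Or.inr ⟨m, hm, h⟩

-- ===== VERDICT (by name: the statement is the Claim_ definition above) =====
theorem has_cta_py_spec : Claim_equal_has_cta_py := by
  intro html _
  show has_cta_py html = has_cta_py_alt html
  rw [Bool.eq_iff_iff]
  simp [has_cta_py, has_cta_py_alt, PySem.Chars.isIn_iff_infix,
    ctaScan_iff, ctaMarkersA, ctaMarkersB]
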